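-- pv_equiv track=rewrite | github.com/Alexander5F/hephaesta | add_context_to_user_prompt.py | create_list_of_filenames
-- ===== SOURCE A (Python) =====
-- def create_list_of_filenames(input_string):
--     start_tag = "<f>"
--     end_tag = "</f>"
--     list_of_filenames = []
--     seen_filenames = set()
--     start_index = 0
--
--     while True:
--         start_loc = input_string.find(start_tag, start_index)
--         if start_loc == -1:
--             break
--         end_loc = input_string.find(end_tag, start_loc + len(start_tag))
--         if end_loc == -1:
--             break
--         filename = input_string[start_loc + len(start_tag):end_loc]
--         if filename not in seen_filenames:
--             list_of_filenames.append(filename)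
--             seen_filenames.add(filename)
--         start_index = end_loc + len(end_tag)
--
--     return list_of_filenames
-- ===== SOURCE B (Python) =====
-- def create_list_of_filenames(input_string):
--     # Collect every tag content first, consuming the string by slicing off the
--     # scanned prefix; deduplicate afterwards in one order-preserving pass.
--     s = input_string
--     matches = []
--     while True:
--         a = s.find("<f>")
--         if a == -1:
--             break
--         b = s.find("</f>", a + 3)
--         if b == -1:
--             break
--         matches.append(s[a + 3:b])
--         s = s[b + 4:]
--     return list(dict.fromkeys(matches))
-- ===== Notes on version B (the rewrite author's own statement) =====
-- stated objective: alternative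
-- what changed: B consumes the string by slicing off each scanned prefix and first collects every tag content, then deduplicates in one separate order-preserving dict.fromkeys pass, instead of A's index-tracking while loop with an interleaved seen-set.
import Mathlib
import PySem

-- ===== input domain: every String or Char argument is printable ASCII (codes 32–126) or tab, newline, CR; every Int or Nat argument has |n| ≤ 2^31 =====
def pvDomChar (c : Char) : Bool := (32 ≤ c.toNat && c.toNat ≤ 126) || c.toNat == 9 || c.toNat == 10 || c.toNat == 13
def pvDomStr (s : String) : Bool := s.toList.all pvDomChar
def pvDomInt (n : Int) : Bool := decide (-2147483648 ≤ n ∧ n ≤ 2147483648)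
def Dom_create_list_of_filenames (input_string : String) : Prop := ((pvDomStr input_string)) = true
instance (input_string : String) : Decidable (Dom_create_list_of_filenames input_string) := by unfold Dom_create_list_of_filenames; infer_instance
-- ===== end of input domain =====

-- B replaces A's index-based while loop with an interleaved seen-set by a recursion on the
-- shrinking suffix that first collects every tag content, then one separate dedup pass.

-- ===== PORT A =====
-- the while loop of A: state = (start_index, list_of_filenames, seen_filenames); fuel only
-- makes the recursion structural (each iteration advances start_index by ≥ 7, so
-- fuel = len + 1 is never exhausted).
def aCore (s : List Char) (fuel : Nat) (i : Nat) (acc : List (List Char))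
    (seen : PySem.Set (List Char)) : List (List Char) :=
  match fuel with
  | 0 => acc
  | fuel + 1 =>
    let sl := PySem.Chars.findFrom s ['<', 'f', '>'] (i : Int) none
    if sl = -1 then acc
    else
      let el := PySem.Chars.findFrom s ['<', '/', 'f', '>'] (sl + 3) none
      if el = -1 then acc
      else
        let fn := PySem.Chars.slice s (some (sl + 3)) (some el)
        if PySem.Set.contains seen fn then aCore s fuel (el.toNat + 4) acc seen
        else aCore s fuel (el.toNat + 4) (acc ++ [fn]) (PySem.Set.add seen fn)

def create_list_of_filenames (input_string : String) : List String :=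
  (aCore input_string.toList (input_string.toList.length + 1) 0 [] []).map
    (fun cs => String.ofList cs)

-- ===== PORT B =====
-- facts about one step of the scan (used for termination of bLoop and in the proofs below)
theorem step_facts (s : List Char)
    (ha : PySem.Chars.find s ['<', 'f', '>'] ≠ -1)
    (hb : PySem.Chars.findFrom s ['<', '/', 'f', '>']
            (PySem.Chars.find s ['<', 'f', '>'] + 3) none ≠ -1) :
    0 ≤ PySem.Chars.find s ['<', 'f', '>'] ∧
    (PySem.Chars.find s ['<', 'f', '>']).toNat + 3 ≤ s.length ∧
    PySem.Chars.find s ['<', 'f', '>'] + 3 ≤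
      PySem.Chars.findFrom s ['<', '/', 'f', '>']
        (PySem.Chars.find s ['<', 'f', '>'] + 3) none ∧
    (PySem.Chars.findFrom s ['<', '/', 'f', '>']
        (PySem.Chars.find s ['<', 'f', '>'] + 3) none).toNat + 4 ≤ s.length := by
  have h0 : 0 ≤ PySem.Chars.find s ['<', 'f', '>'] := by
    have := PySem.Chars.neg_one_le_find s ['<', 'f', '>']
    omega
  have hsp := (PySem.Chars.find_spec (s := s) (sub := ['<', 'f', '>']) h0).1
  have hlen3 : (PySem.Chars.find s ['<', 'f', '>']).toNat + 3 ≤ s.length := by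
    have := hsp.length_le
    rw [List.length_drop] at this
    simp only [List.length_cons, List.length_nil] at this
    omega
  have hcast : PySem.Chars.find s ['<', 'f', '>'] + 3 =
      (((PySem.Chars.find s ['<', 'f', '>']).toNat + 3 : Nat) : Int) := by
    omega
  rw [hcast] at hb ⊢
  have hspec := PySem.Chars.findFrom_natCast_spec s ['<', '/', 'f', '>']
    ((PySem.Chars.find s ['<', 'f', '>']).toNat + 3) (by omega) hb
  refine ⟨h0, hlen3, hspec.1, ?_⟩
  have := hspec.2.1.length_le
  rw [List.length_drop] at this
  simp only [List.length_cons, List.length_nil] at this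
  omega

theorem step_shrink (s : List Char)
    (ha : PySem.Chars.find s ['<', 'f', '>'] ≠ -1)
    (hb : PySem.Chars.findFrom s ['<', '/', 'f', '>']
            (PySem.Chars.find s ['<', 'f', '>'] + 3) none ≠ -1) :
    (PySem.Chars.slice s
      (some (PySem.Chars.findFrom s ['<', '/', 'f', '>']
               (PySem.Chars.find s ['<', 'f', '>'] + 3) none + 4)) none).length < s.length := by
  obtain ⟨h0, h3, hab, hb4⟩ := step_facts s ha hb
  rw [PySem.Chars.slice_eq_listSlice,
    PySem.List.slice_from (xs := s)
      (a := PySem.Chars.findFrom s ['<', '/', 'f', '>']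
              (PySem.Chars.find s ['<', 'f', '>'] + 3) none + 4) (by omega)]
  rw [List.length_drop]
  omega

-- the while loop of B: collects every match, recursing on the sliced-off suffix
def bLoop (s : List Char) (acc : List (List Char)) : List (List Char) :=
  if ha : PySem.Chars.find s ['<', 'f', '>'] = -1 then acc
  else
    if hb : PySem.Chars.findFrom s ['<', '/', 'f', '>']
              (PySem.Chars.find s ['<', 'f', '>'] + 3) none = -1 then acc
    else
      bLoop
        (PySem.Chars.slice s
          (some (PySem.Chars.findFrom s ['<', '/', 'f', '>']
                   (PySem.Chars.find s ['<', 'f', '>'] + 3) none + 4)) none)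
        (acc ++ [PySem.Chars.slice s
          (some (PySem.Chars.find s ['<', 'f', '>'] + 3))
          (some (PySem.Chars.findFrom s ['<', '/', 'f', '>']
                   (PySem.Chars.find s ['<', 'f', '>'] + 3) none))])
termination_by s.length
decreasing_by exact step_shrink s ha hb

def create_list_of_filenames_alt (input_string : String) : List String :=
  (PySem.List.dedup (bLoop input_string.toList [])).map (fun cs => String.ofList cs)

-- ===== PRECONDITION & SPEC =====
def Spec_create_list_of_filenames (input_string : String) (out : List String) : Prop := out = create_list_of_filenames_alt input_string
instance (input_string : String) (out : List String) : Decidable (Spec_create_list_of_filenames input_string out) := by unfold Spec_create_list_of_filenames; infer_instance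

-- ===== CLAIM (what is proved, stated in full; the proofs are below) =====
def Claim_equal_create_list_of_filenames : Prop := ∀ (input_string : String), Dom_create_list_of_filenames input_string → Spec_create_list_of_filenames input_string (create_list_of_filenames input_string)

-- ===== LEMMAS AND PROOFS =====

-- interleaved first-seen filter against a seen set (the shape of A's dedup)
def newOnes (seen : PySem.Set (List Char)) : List (List Char) → List (List Char)
  | [] => []
  | x :: xs =>
    if PySem.Set.contains seen x then newOnes seen xs
    else x :: newOnes (PySem.Set.add seen x) xs

theorem bLoop_acc (n : Nat) : ∀ s : List Char, s.length ≤ n → ∀ acc,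
    bLoop s acc = acc ++ bLoop s [] := by
  induction n with
  | zero =>
    intro s hs acc
    have hnil : s = [] := List.eq_nil_of_length_eq_zero (Nat.le_zero.mp hs)
    subst hnil
    conv_rhs => rw [bLoop]
    rw [bLoop]
    have h : PySem.Chars.find ([] : List Char) ['<', 'f', '>'] = -1 := by decide
    simp [h]
  | succ n ih =>
    intro s hs acc
    conv_rhs => rw [bLoop]
    rw [bLoop]
    by_cases ha : PySem.Chars.find s ['<', 'f', '>'] = -1
    · simp [ha]
    · by_cases hb : PySem.Chars.findFrom s ['<', '/', 'f', '>']
          (PySem.Chars.find s ['<', 'f', '>'] + 3) none = -1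
      · simp [ha, hb]
      · have hlt := step_shrink s ha hb
        simp only [dif_neg ha, dif_neg hb]
        rw [ih _ (by omega) (acc ++ [PySem.Chars.slice s (some (PySem.Chars.find s ['<', 'f', '>'] + 3))
              (some (PySem.Chars.findFrom s ['<', '/', 'f', '>']
                       (PySem.Chars.find s ['<', 'f', '>'] + 3) none))]),
            ih _ (by omega) ([] ++ [PySem.Chars.slice s (some (PySem.Chars.find s ['<', 'f', '>'] + 3))
              (some (PySem.Chars.findFrom s ['<', '/', 'f', '>']
                       (PySem.Chars.find s ['<', 'f', '>'] + 3) none))])]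
        simp

theorem aCore_eq (fuel : Nat) : ∀ (s : List Char) (i : Nat), i ≤ s.length →
    (s.drop i).length < fuel → ∀ acc seen,
    aCore s fuel i acc seen = acc ++ newOnes seen (bLoop (s.drop i) []) := by
  induction fuel with
  | zero => intro s i hi hf; exact absurd hf (by omega)
  | succ fuel ih =>
    intro s i hi hf acc seen
    have hT := PySem.Chars.findFrom_natCast s ['<', 'f', '>'] i hi
    by_cases hA : PySem.Chars.find (s.drop i) ['<', 'f', '>'] = -1
    · have hslEq : PySem.Chars.findFrom s ['<', 'f', '>'] (i : Int) none = -1 := by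
        rw [hT]; simp [hA]
      rw [bLoop]
      simp only [aCore, hslEq, dif_pos hA]
      simp [newOnes]
    · have h0a : 0 ≤ PySem.Chars.find (s.drop i) ['<', 'f', '>'] := by
        have := PySem.Chars.neg_one_le_find (s.drop i) ['<', 'f', '>']
        omega
      have haT : PySem.Chars.find (s.drop i) ['<', 'f', '>'] =
          (((PySem.Chars.find (s.drop i) ['<', 'f', '>']).toNat : Nat) : Int) :=
        (Int.toNat_of_nonneg h0a).symm
      generalize haN : (PySem.Chars.find (s.drop i) ['<', 'f', '>']).toNat = aN at haT
      have hsl : PySem.Chars.findFrom s ['<', 'f', '>'] (i : Int) none =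
          ((i + aN : Nat) : Int) := by
        rw [hT, if_neg hA, haT]; push_cast; ring
      have h3 : aN + 3 ≤ (s.drop i).length := by
        have := (PySem.Chars.find_spec (s := s.drop i) (sub := ['<', 'f', '>']) h0a).1.length_le
        rw [List.length_drop, haN] at this
        simp only [List.length_cons, List.length_nil] at this
        omega
      have hi3 : i + aN + 3 ≤ s.length := by rw [List.length_drop] at h3; omega
      have hdd : (s.drop i).drop (aN + 3) = s.drop (i + aN + 3) := by
        rw [List.drop_drop, ← Nat.add_assoc]
      have hE := PySem.Chars.findFrom_natCast s ['<', '/', 'f', '>'] (i + aN + 3) hi3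
      have hEb := PySem.Chars.findFrom_natCast (s.drop i) ['<', '/', 'f', '>'] (aN + 3) h3
      rw [hdd] at hEb
      have hcast1 : ((i + aN : Nat) : Int) + 3 = ((i + aN + 3 : Nat) : Int) := by push_cast; ring
      have hcast2 : ((aN : Nat) : Int) + 3 = ((aN + 3 : Nat) : Int) := by push_cast; ring
      by_cases hB : PySem.Chars.find (s.drop (i + aN + 3)) ['<', '/', 'f', '>'] = -1
      · have hel : PySem.Chars.findFrom s ['<', '/', 'f', '>'] (((i + aN : Nat) : Int) + 3) none = -1 := by
          rw [hcast1, hE]; simp [hB]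
        have helB : PySem.Chars.findFrom (s.drop i) ['<', '/', 'f', '>']
            (PySem.Chars.find (s.drop i) ['<', 'f', '>'] + 3) none = -1 := by
          rw [haT, hcast2, hEb]; simp [hB]
        rw [bLoop]
        simp only [aCore, hsl, hel, dif_neg hA, dif_pos helB]
        simp [newOnes]
      · have h0e : 0 ≤ PySem.Chars.find (s.drop (i + aN + 3)) ['<', '/', 'f', '>'] := by
          have := PySem.Chars.neg_one_le_find (s.drop (i + aN + 3)) ['<', '/', 'f', '>']
          omega
        have haE : PySem.Chars.find (s.drop (i + aN + 3)) ['<', '/', 'f', '>'] =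
            (((PySem.Chars.find (s.drop (i + aN + 3)) ['<', '/', 'f', '>']).toNat : Nat) : Int) :=
          (Int.toNat_of_nonneg h0e).symm
        generalize heN : (PySem.Chars.find (s.drop (i + aN + 3)) ['<', '/', 'f', '>']).toNat = eN at haE
        have hi4 : i + aN + 3 + eN + 4 ≤ s.length := by
          have := (PySem.Chars.find_spec (s := s.drop (i + aN + 3))
            (sub := ['<', '/', 'f', '>']) h0e).1.length_le
          rw [List.length_drop, List.length_drop, heN] at this
          simp only [List.length_cons, List.length_nil] at this
          omega
        have hel : PySem.Chars.findFrom s ['<', '/', 'f', '>']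
            (((i + aN : Nat) : Int) + 3) none = ((i + aN + 3 + eN : Nat) : Int) := by
          rw [hcast1, hE, if_neg (by rw [haE]; omega), haE]; push_cast; ring
        have helB : PySem.Chars.findFrom (s.drop i) ['<', '/', 'f', '>']
            (((aN + 3 : Nat) : Int)) none = ((aN + 3 + eN : Nat) : Int) := by
          rw [hEb, if_neg (by rw [haE]; omega), haE]; push_cast; ring
        have hfnA : PySem.Chars.slice s (some (((i + aN : Nat) : Int) + 3))
            (some ((i + aN + 3 + eN : Nat) : Int)) = List.take eN (s.drop (i + aN + 3)) := by
          rw [hcast1, PySem.Chars.slice_eq_listSlice, PySem.List.slice_natCast]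
          congr 1
          omega
        have hfnB : PySem.Chars.slice (s.drop i) (some ((aN + 3 : Nat) : Int))
            (some ((aN + 3 + eN : Nat) : Int)) = List.take eN (s.drop (i + aN + 3)) := by
          rw [PySem.Chars.slice_eq_listSlice, PySem.List.slice_natCast, hdd]
          congr 1
          omega
        have hsufB : PySem.Chars.slice (s.drop i)
            (some (((aN + 3 + eN : Nat) : Int) + 4)) none = s.drop (i + aN + 3 + eN + 4) := by
          rw [show ((aN + 3 + eN : Nat) : Int) + 4 = ((aN + 3 + eN + 4 : Nat) : Int) from by
                push_cast; ring,
            PySem.Chars.slice_eq_listSlice,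
            PySem.List.slice_from (xs := s.drop i) (a := ((aN + 3 + eN + 4 : Nat) : Int))
              (by omega)]
          rw [Int.toNat_natCast, List.drop_drop,
            show i + (aN + 3 + eN + 4) = i + aN + 3 + eN + 4 from by omega]
        have hf' : (s.drop (i + aN + 3 + eN + 4)).length < fuel := by
          rw [List.length_drop]
          rw [List.length_drop] at hf
          omega
        -- unfold B one step and pull the new match out of the accumulator
        rw [bLoop, dif_neg hA]
        rw [haT, hcast2]
        rw [dif_neg (by rw [helB]; omega)]
        rw [helB, hfnB, hsufB]
        rw [bLoop_acc (s.drop (i + aN + 3 + eN + 4)).length _ (Nat.le_refl _)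
          ([] ++ [List.take eN (s.drop (i + aN + 3))])]
        -- unfold A one step
        simp only [aCore, hsl, hel, hfnA, Int.toNat_natCast,
          if_neg (show ¬ ((i + aN : Nat) : Int) = -1 from by omega),
          if_neg (show ¬ ((i + aN + 3 + eN : Nat) : Int) = -1 from by omega)]
        by_cases hc : PySem.Set.contains seen (List.take eN (s.drop (i + aN + 3)))
        · rw [if_pos hc, ih s (i + aN + 3 + eN + 4) hi4 hf' acc seen]
          simp only [List.nil_append, List.singleton_append, newOnes, if_pos hc]
        · rw [if_neg hc, ih s (i + aN + 3 + eN + 4) hi4 hf' (acc ++ [_]) (PySem.Set.add seen _)]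
          simp only [List.nil_append, List.singleton_append, newOnes, if_neg hc,
            List.append_assoc]

theorem foldl_add_prefix (xs : List (List Char)) (s0 : PySem.Set (List Char)) :
    s0 <+: xs.foldl PySem.Set.add s0 := by
  induction xs generalizing s0 with
  | nil => exact List.prefix_rfl
  | cons x xs ihx =>
    refine List.IsPrefix.trans ?_ (ihx (PySem.Set.add s0 x))
    unfold PySem.Set.add
    split_ifs
    · exact List.prefix_rfl
    · exact List.prefix_append s0 [x]

theorem newOnes_eq_drop_foldl (xs : List (List Char)) (seen : PySem.Set (List Char)) :
    newOnes seen xs = (xs.foldl PySem.Set.add seen).drop seen.length := by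
  induction xs generalizing seen with
  | nil => simp [newOnes]
  | cons x xs ihx =>
    by_cases hc : PySem.Set.contains seen x
    · have hadd : PySem.Set.add seen x = seen := by unfold PySem.Set.add; rw [if_pos hc]
      simp only [newOnes, if_pos hc, List.foldl_cons, hadd]
      exact ihx seen
    · have hadd : PySem.Set.add seen x = seen ++ [x] := by unfold PySem.Set.add; rw [if_neg hc]
      simp only [newOnes, if_neg hc, List.foldl_cons, hadd]
      obtain ⟨t, ht⟩ := foldl_add_prefix xs (seen ++ [x])
      rw [ihx (seen ++ [x]), ← ht, List.drop_left, List.append_assoc, List.drop_left,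
        List.singleton_append]

theorem newOnes_nil_eq_dedup (xs : List (List Char)) :
    newOnes [] xs = PySem.List.dedup xs := by
  rw [newOnes_eq_drop_foldl, PySem.List.dedup_eq_ofList, PySem.Set.ofList_eq_foldl]
  simp

-- ===== VERDICT (by name: the statement is the Claim_ definition above) =====
theorem create_list_of_filenames_spec : Claim_equal_create_list_of_filenames := by
  intro s _
  unfold Spec_create_list_of_filenames create_list_of_filenames create_list_of_filenames_alt
  rw [aCore_eq (s.toList.length + 1) s.toList 0 (Nat.zero_le _)
      (by simp), newOnes_nil_eq_dedup]
  simp
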